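-- pv_equiv track=rewrite | github.com/olegyuziv/Advent-of-code-2023 | AOC_3/AOC_3_P1.py | sum_valid_parts
-- ===== SOURCE A (Python) =====
-- def sum_valid_parts(engine_map, validity_map):
--     """
--     Sums the part numbers in the engine map that are marked as valid.
--
--     :param engine_map: The engine map as a list of strings.
--     :param validity_map: 2D list indicating valid parts.
--     :return: Sum of valid part numbers.
--     """
--     sum_parts, current_number, is_valid = 0, '', False
--     for y, row in enumerate(engine_map):
--         for x, char in enumerate(row):
--             if char.isdigit():
--                 current_number += char
--                 is_valid |= validity_map[y][x]
--             else:
--                 if is_valid and current_number: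
--                     sum_parts += int(current_number)
--                 current_number, is_valid = '', False
--
--     return sum_parts + int(current_number) if is_valid and current_number else sum_parts
-- ===== SOURCE B (Python) =====
-- def sum_valid_parts(engine_map, validity_map):
--     cells = [(c, validity_map[y][x] if c.isdigit() else False)
--              for y, row in enumerate(engine_map)
--              for x, c in enumerate(row)]
--     total = 0
--     i, n = 0, len(cells)
--     while i < n:
--         if not cells[i][0].isdigit():
--             i += 1
--             continue
--         j = i
--         while j < n and cells[j][0].isdigit():
--             j += 1
--         run = cells[i:j]
--         if any(f for _, f in run):
--             total += int(''.join(c for c, _ in run))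
--         i = j
--     return total
-- ===== Notes on version B (the rewrite author's own statement) =====
-- stated objective: alternative
-- what changed: Replaces A's per-character accumulator state machine over nested grid loops with a flatten-then-run-scan: build one flat list of (char, validity-flag) cells, then a two-pointer loop over maximal digit runs summing each run's value when any flag in it is set.
import Mathlib
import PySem

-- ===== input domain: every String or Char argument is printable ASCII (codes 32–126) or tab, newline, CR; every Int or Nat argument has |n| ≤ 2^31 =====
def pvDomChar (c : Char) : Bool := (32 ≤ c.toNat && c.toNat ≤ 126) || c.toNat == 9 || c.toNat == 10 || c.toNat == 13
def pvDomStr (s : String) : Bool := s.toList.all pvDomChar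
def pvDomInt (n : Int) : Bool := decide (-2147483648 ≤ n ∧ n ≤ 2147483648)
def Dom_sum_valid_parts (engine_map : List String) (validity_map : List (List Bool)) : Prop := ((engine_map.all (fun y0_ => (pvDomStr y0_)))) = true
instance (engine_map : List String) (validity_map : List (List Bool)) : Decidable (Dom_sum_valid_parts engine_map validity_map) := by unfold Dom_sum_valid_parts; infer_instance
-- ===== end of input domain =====

-- B flattens the grid into one cell list (char, validity-flag) and scans maximal digit runs
-- with a two-pointer pass, instead of A's per-character accumulator state machine; objective: alternative.

-- ===== PORT A =====
def sum_valid_parts (engine_map : List String) (validity_map : List (List Bool)) : Int :=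
  -- state = (sum_parts, current_number as char list, is_valid)
  let st :=
    (PySem.List.enumerate engine_map 0).foldl (fun st yr =>
      (PySem.List.enumerate yr.2.toList 0).foldl (fun st xc =>
        if PySem.Chars.isdigit xc.2 then
          (st.1, st.2.1 ++ [xc.2],
            st.2.2 || PySem.List.pyGetD (PySem.List.pyGetD validity_map yr.1 []) xc.1 false)
        else
          ((if st.2.2 && !st.2.1.isEmpty then st.1 + (PySem.Int.ofChars? st.2.1).getD 0 else st.1),
            ([] : List Char), false)) st)
      ((0 : Int), ([] : List Char), false)
  if st.2.2 && !st.2.1.isEmpty then st.1 + (PySem.Int.ofChars? st.2.1).getD 0 else st.1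

-- ===== PORT B =====
-- the flat cell list built by Source B's comprehension
def pvCells (engine_map : List String) (validity_map : List (List Bool)) : List (Char × Bool) :=
  (PySem.List.enumerate engine_map 0).flatMap (fun yr =>
    (PySem.List.enumerate yr.2.toList 0).map (fun xc =>
      (xc.2, if PySem.Chars.isdigit xc.2
             then PySem.List.pyGetD (PySem.List.pyGetD validity_map yr.1 []) xc.1 false
             else false)))

-- Source B's two-pointer while loop: skip a non-digit cell, otherwise take the maximal digit run
def pvScan : List (Char × Bool) → Int
  | [] => 0
  | (c, f) :: rest =>
    if PySem.Chars.isdigit c then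
      let run := (c, f) :: rest.takeWhile (fun p => PySem.Chars.isdigit p.1)
      (if run.any (·.2) then (PySem.Int.ofChars? (run.map (·.1))).getD 0 else 0)
        + pvScan (rest.dropWhile (fun p => PySem.Chars.isdigit p.1))
    else pvScan rest
  termination_by cs => cs.length
  decreasing_by
    · exact Nat.lt_succ_of_le (List.length_dropWhile_le _ _)
    · simp

def sum_valid_parts_alt (engine_map : List String) (validity_map : List (List Bool)) : Int :=
  pvScan (pvCells engine_map validity_map)

-- ===== PRECONDITION & SPEC =====
-- Pre_ excludes inputs where a digit cell's validity lookup is out of range: there Python A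
-- (and B alike) raises IndexError.
def Pre_sum_valid_parts (engine_map : List String) (validity_map : List (List Bool)) : Prop :=
  ∀ y, y < engine_map.length →
    ∀ x, x < (engine_map.getD y "").toList.length →
      PySem.Chars.isdigit ((engine_map.getD y "").toList.getD x ' ') = true →
        y < validity_map.length ∧ x < (validity_map.getD y []).length
instance (engine_map : List String) (validity_map : List (List Bool)) : Decidable (Pre_sum_valid_parts engine_map validity_map) := by unfold Pre_sum_valid_parts; infer_instance
def pvWitness_sum_valid_parts : List String × List (List Bool) :=
  (["12*", ".7a"], [[true, false, false], [false, false, false]])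
def Spec_sum_valid_parts (engine_map : List String) (validity_map : List (List Bool)) (out : Int) : Prop := out = sum_valid_parts_alt engine_map validity_map
instance (engine_map : List String) (validity_map : List (List Bool)) (out : Int) : Decidable (Spec_sum_valid_parts engine_map validity_map out) := by unfold Spec_sum_valid_parts; infer_instance

-- ===== CLAIM (what is proved, stated in full; the proofs are below) =====
def Claim_equal_sum_valid_parts : Prop := ∀ (engine_map : List String) (validity_map : List (List Bool)), Dom_sum_valid_parts engine_map validity_map → Pre_sum_valid_parts engine_map validity_map → Spec_sum_valid_parts engine_map validity_map (sum_valid_parts engine_map validity_map)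

-- ===== LEMMAS AND PROOFS =====

-- A's loop body, abstracted over a single precomputed cell
def pvStep (st : Int × List Char × Bool) (cell : Char × Bool) : Int × List Char × Bool :=
  if PySem.Chars.isdigit cell.1 then (st.1, st.2.1 ++ [cell.1], st.2.2 || cell.2)
  else ((if st.2.2 && !st.2.1.isEmpty then st.1 + (PySem.Int.ofChars? st.2.1).getD 0 else st.1),
        ([] : List Char), false)

def pvFinish (st : Int × List Char × Bool) : Int :=
  if st.2.2 && !st.2.1.isEmpty then st.1 + (PySem.Int.ofChars? st.2.1).getD 0 else st.1

-- reference: value still to be produced, given pending run cur and its validity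
def pvR (cur : List Char) (valid : Bool) : List (Char × Bool) → Int
  | [] => if valid && !cur.isEmpty then (PySem.Int.ofChars? cur).getD 0 else 0
  | (c, f) :: t =>
    if PySem.Chars.isdigit c then pvR (cur ++ [c]) (valid || f) t
    else (if valid && !cur.isEmpty then (PySem.Int.ofChars? cur).getD 0 else 0) + pvR [] false t

theorem pvInner_eq (vm : List (List Bool)) (y : Int) :
    ∀ (cs : List Char) (s : Int) (st : Int × List Char × Bool),
      (PySem.List.enumerate cs s).foldl (fun st xc =>
        if PySem.Chars.isdigit xc.2 then
          (st.1, st.2.1 ++ [xc.2],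
            st.2.2 || PySem.List.pyGetD (PySem.List.pyGetD vm y []) xc.1 false)
        else
          ((if st.2.2 && !st.2.1.isEmpty then st.1 + (PySem.Int.ofChars? st.2.1).getD 0 else st.1),
            ([] : List Char), false)) st
      = ((PySem.List.enumerate cs s).map (fun xc =>
          (xc.2, if PySem.Chars.isdigit xc.2
                 then PySem.List.pyGetD (PySem.List.pyGetD vm y []) xc.1 false
                 else false))).foldl pvStep st := by
  intro cs
  induction cs with
  | nil => intro s st; simp [PySem.List.enumerate_nil]
  | cons c cs ih =>
    intro s st
    simp only [PySem.List.enumerate_cons, List.map_cons, List.foldl_cons, ih]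
    congr 1
    by_cases h : PySem.Chars.isdigit c = true <;> simp [pvStep, h]

theorem pvOuter_eq (vm : List (List Bool)) :
    ∀ (em : List String) (s : Int) (st : Int × List Char × Bool),
      (PySem.List.enumerate em s).foldl (fun st yr =>
        (PySem.List.enumerate yr.2.toList 0).foldl (fun st xc =>
          if PySem.Chars.isdigit xc.2 then
            (st.1, st.2.1 ++ [xc.2],
              st.2.2 || PySem.List.pyGetD (PySem.List.pyGetD vm yr.1 []) xc.1 false)
          else
            ((if st.2.2 && !st.2.1.isEmpty then st.1 + (PySem.Int.ofChars? st.2.1).getD 0 else st.1),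
              ([] : List Char), false)) st) st
      = ((PySem.List.enumerate em s).flatMap (fun yr =>
          (PySem.List.enumerate yr.2.toList 0).map (fun xc =>
            (xc.2, if PySem.Chars.isdigit xc.2
                   then PySem.List.pyGetD (PySem.List.pyGetD vm yr.1 []) xc.1 false
                   else false)))).foldl pvStep st := by
  intro em
  induction em with
  | nil => intro s st; simp [PySem.List.enumerate_nil]
  | cons r em ih =>
    intro s st
    simp only [PySem.List.enumerate_cons, List.flatMap_cons, List.foldl_cons, List.foldl_append]
    rw [pvInner_eq, ih]

theorem pvA_eq (em : List String) (vm : List (List Bool)) :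
    sum_valid_parts em vm = pvFinish ((pvCells em vm).foldl pvStep ((0 : Int), ([] : List Char), false)) := by
  unfold sum_valid_parts pvCells pvFinish
  rw [pvOuter_eq]

theorem pvFold_eq_R :
    ∀ (cells : List (Char × Bool)) (s : Int) (cur : List Char) (valid : Bool),
      pvFinish (cells.foldl pvStep (s, cur, valid)) = s + pvR cur valid cells := by
  intro cells
  induction cells with
  | nil => intro s cur valid; by_cases h : (valid && !cur.isEmpty) = true <;> simp [pvFinish, pvR, h]
  | cons cf t ih =>
    intro s cur valid
    obtain ⟨c, f⟩ := cf
    by_cases h : PySem.Chars.isdigit c = true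
    · simp [pvStep, pvR, h, List.foldl_cons, ih]
    · simp only [pvR, h, List.foldl_cons, pvStep, Bool.false_eq_true, ite_false]
      rw [ih]
      by_cases hv : (valid && !cur.isEmpty) = true <;> simp [hv] <;> ring

theorem pvR_run :
    ∀ (t : List (Char × Bool)) (cur : List Char) (valid : Bool), cur ≠ [] →
      pvR cur valid t =
        (if valid || (t.takeWhile (fun p => PySem.Chars.isdigit p.1)).any (·.2)
         then (PySem.Int.ofChars? (cur ++ (t.takeWhile (fun p => PySem.Chars.isdigit p.1)).map (·.1))).getD 0
         else 0)
        + pvR [] false (t.dropWhile (fun p => PySem.Chars.isdigit p.1)) := by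
  intro t
  induction t with
  | nil =>
    intro cur valid hcur
    simp [pvR, hcur]
  | cons cf t ih =>
    intro cur valid hcur
    obtain ⟨c, f⟩ := cf
    by_cases h : PySem.Chars.isdigit c = true
    · simp only [pvR, h, if_pos, List.takeWhile_cons, List.dropWhile_cons]
      rw [ih (cur ++ [c]) (valid || f) (by simp)]
      simp [Bool.or_assoc, List.append_assoc]
    · simp only [pvR, h, Bool.false_eq_true, ite_false, List.takeWhile_cons, List.dropWhile_cons,
        List.any_nil, List.map_nil, List.append_nil, Bool.or_false]
      simp [hcur]

theorem pvScan_eq_R : ∀ (cells : List (Char × Bool)), pvScan cells = pvR [] false cells := by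
  intro cells
  induction cells using pvScan.induct with
  | case1 => simp [pvScan, pvR]
  | case2 c f rest h ih =>
    rw [pvScan]
    simp only [h, if_pos]
    have hR : pvR ([] : List Char) false ((c, f) :: rest) = pvR [c] f rest := by
      simp [pvR, h]
    rw [hR, pvR_run rest [c] f (by simp), ih]
    simp
  | case3 c f rest h ih =>
    rw [pvScan]
    simp [h, ih, pvR]

-- ===== VERDICT (by name: the statement is the Claim_ definition above) =====
theorem sum_valid_parts_spec : Claim_equal_sum_valid_parts := by
  intro em vm _ _
  unfold Spec_sum_valid_parts sum_valid_parts_alt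
  rw [pvA_eq, pvFold_eq_R, pvScan_eq_R]
  simp
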